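-- pv_equiv track=rewrite | github.com/CodeCommandante/hamming-error-correction | Utilities.py | genRMatrix
-- ===== SOURCE A (Python) =====
-- import math
--
-- def buildParityBitMatrix(NumBits):
--     """
--     Constructs the parity and data bit matrix based on the number of bits requested
--     by the user.  This matrix is used throughout by other methods to construct
--     the other matrices used for error detection and correction.
--
--     Parameters
--     ----------
--     NumBits : integer
--         The number of data bits being transmitted in the message.
--
--     Returns
--     -------
--     ParityBitMatrix : 2D array
--         The parity/data bit matrix.
--
--     """
--     #First row of Matrix defines parity bits as 1, all else as 0
--     #This row will be unused, except as a
--     #reference to which bits are parity bits and which not.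
--     ParityBitMatrix = []
--     if NumBits <= 0:
--         return ParityBitMatrix
--     #Make the matrix roughly twice the size it needs to be, to handle potential
--     #overflow/overrun.
--     NumCols = 2*(math.floor(math.log2(NumBits)) + 2 + NumBits)
--     NumRows = math.floor(math.log2(NumBits)) + 3
--     p = 0
--     Row = []
--     for ColIndex in range(NumCols):
--         if 2**p == ColIndex:
--             Row.append(1)
--             p = p + 1
--         else:
--             Row.append(0)
--     ParityBitMatrix.append(Row)
--     #Build remainder of Matrix.  Index 0 will always be 0 and is, again,
--     #unused by future constructions.
--     RowIndex = 1
--     while RowIndex < NumRows: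
--         CurrRow = []
--         Ticker = 2**(RowIndex-1)
--         TickerLimit = -(2**(RowIndex-1))
--         j = 0
--         while j < NumCols:
--             if j < Ticker:
--                 CurrRow.append(0)
--             elif Ticker > 0:
--                 CurrRow.append(1)
--                 Ticker = Ticker - 1
--             else:
--                 CurrRow.append(0)
--                 Ticker = Ticker - 1
--             if Ticker == TickerLimit:
--                 Ticker = 2**(RowIndex-1)
--             j = j + 1
--         ParityBitMatrix.append(CurrRow)
--         RowIndex = RowIndex + 1
--     return ParityBitMatrix
--
-- def genRMatrix(MessLength):
--     """
--     Generates the r-matrix (vector), which is the received message in the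
--     transmission.
--
--     Parameters
--     ----------
--     MessLength : integer
--         The length of the recieved message.
--
--     Returns
--     -------
--     RMatrix : 2D array
--         The r-matrix (vector).
--
--     """
--     NumRows = MessLength - math.ceil(math.log2(MessLength))
--     PBitMatrix = buildParityBitMatrix(NumRows)
--     RMatrix = []
--     IdBit = 1
--     for i in range(NumRows):
--         Row = []
--         Bit = 1
--         for j in range(MessLength):
--             if PBitMatrix[0][j+1] == 1:
--                 Row.append(0)
--             elif IdBit == Bit:
--                 Row.append(1)
--                 Bit = Bit + 1
--             else:
--                 Row.append(0)
--                 Bit = Bit + 1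
--         IdBit = IdBit + 1
--         RMatrix.append(Row)
--     return RMatrix
-- ===== SOURCE B (Python) =====
-- import math
--
-- def genRMatrix(MessLength):
--     # Number of identity rows: message length minus number of parity bits.
--     NumRows = MessLength - math.ceil(math.log2(MessLength))
--     # Data-bit columns are those whose 1-based position is NOT a power of two.
--     dataCols = [j for j in range(MessLength) if (j + 1) & j != 0]
--     RMatrix = []
--     for i in range(NumRows):
--         Row = [0] * MessLength
--         if i < len(dataCols):
--             Row[dataCols[i]] = 1
--         RMatrix.append(Row)
--     return RMatrix
-- ===== Notes on version B (the rewrite author's own statement) =====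
-- stated objective: simpler
-- what changed: A builds an oversized parity-bit reference matrix and fills each row by scanning every column with running Bit/IdBit counters; B computes the data-column positions once (positions whose successor is not a power of two, via a bit trick) and builds each row by placing its single nonzero entry directly at the i-th data column.
import Mathlib
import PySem

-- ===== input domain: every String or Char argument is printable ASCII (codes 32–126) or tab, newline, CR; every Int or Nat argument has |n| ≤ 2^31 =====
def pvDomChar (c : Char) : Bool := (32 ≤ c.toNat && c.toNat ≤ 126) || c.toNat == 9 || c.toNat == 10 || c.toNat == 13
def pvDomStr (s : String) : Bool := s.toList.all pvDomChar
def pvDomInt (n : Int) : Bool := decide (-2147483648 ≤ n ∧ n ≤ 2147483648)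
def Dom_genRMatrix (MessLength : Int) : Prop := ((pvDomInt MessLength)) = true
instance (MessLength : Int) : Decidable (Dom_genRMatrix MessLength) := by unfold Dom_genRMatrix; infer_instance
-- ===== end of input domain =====

-- B replaces A's per-cell parity-row scan with counters by a one-pass data-column index
-- list and direct placement of each row's single nonzero entry (objective: simpler).

-- ===== PORT A =====
-- math.floor(math.log2 n) / math.ceil(math.log2 n): exact integer values for 1 ≤ n ≤ 2^31
-- (double log2 cannot be off by a rounding step there); for n ≤ 0 Python raises ValueError,
-- excluded by Pre_genRMatrix below.
def pvFloorLog2 (n : Int) : Int := (Nat.log 2 n.toNat : Int)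
def pvCeilLog2 (n : Int) : Int := (Nat.clog 2 n.toNat : Int)

-- first 'for ColIndex in range(NumCols)' loop of buildParityBitMatrix; ColIndex and p are
-- the (always nonnegative) Python ints, fuel = NumCols
def pvRow0 : Nat → Nat → Nat → List Int
  | 0, _, _ => []
  | f + 1, c, p =>
    if 2 ^ p = c then 1 :: pvRow0 f (c + 1) (p + 1)
    else 0 :: pvRow0 f (c + 1) p

-- inner 'while j < NumCols' ticker loop; fuel = NumCols - j
def pvTickRow : Nat → Int → Int → Int → Int → List Int
  | 0, _, _, _, _ => []
  | f + 1, j, t, lim, init =>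
    let vt : Int × Int :=
      if j < t then (0, t)
      else if t > 0 then (1, t - 1)
      else (0, t - 1)
    let t' := if vt.2 = lim then init else vt.2
    vt.1 :: pvTickRow f (j + 1) t' lim init

-- outer 'while RowIndex < NumRows' loop of buildParityBitMatrix
def pvPBRows : Nat → Int → Int → Int → List (List Int)
  | 0, _, _, _ => []
  | f + 1, rowIndex, numRows, numCols =>
    if rowIndex < numRows then
      pvTickRow numCols.toNat 0 (2 ^ (rowIndex - 1).toNat) (-(2 ^ (rowIndex - 1).toNat : Int))
          (2 ^ (rowIndex - 1).toNat)
        :: pvPBRows f (rowIndex + 1) numRows numCols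
    else []

def buildParityBitMatrix (NumBits : Int) : List (List Int) :=
  if NumBits ≤ 0 then []
  else
    let NumCols : Int := 2 * (pvFloorLog2 NumBits + 2 + NumBits)
    let NumRows : Int := pvFloorLog2 NumBits + 3
    let Row := pvRow0 NumCols.toNat 0 0
    Row :: pvPBRows (NumRows - 1).toNat 1 NumRows NumCols

-- inner 'for j in range(MessLength)' loop of genRMatrix; 'PBitMatrix[0][j+1] == 1' is the
-- pyGet? test (inside Pre_ the index is always in range, so Python never raises there)
def pvInner (row0 : List Int) : Nat → Int → Int → Int → List Int
  | 0, _, _, _ => []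
  | f + 1, j, bit, idBit =>
    if PySem.List.pyGet? row0 (j + 1) = some 1 then 0 :: pvInner row0 f (j + 1) bit idBit
    else if idBit = bit then 1 :: pvInner row0 f (j + 1) (bit + 1) idBit
    else 0 :: pvInner row0 f (j + 1) (bit + 1) idBit

-- outer 'for i in range(NumRows)' loop of genRMatrix
def pvOuter (row0 : List Int) (messLength : Int) : Nat → Int → List (List Int)
  | 0, _ => []
  | f + 1, idBit => pvInner row0 messLength.toNat 0 1 idBit :: pvOuter row0 messLength f (idBit + 1)

def genRMatrix (MessLength : Int) : List (List Int) :=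
  let NumRows := MessLength - pvCeilLog2 MessLength
  let PBitMatrix := buildParityBitMatrix NumRows
  -- 'PBitMatrix[0]' (inside Pre_ the matrix is nonempty, so Python never raises here)
  let row0 := (PySem.List.pyGet? PBitMatrix 0).getD []
  pvOuter row0 MessLength NumRows.toNat 1

-- ===== PORT B =====
def genRMatrix_alt (MessLength : Int) : List (List Int) :=
  -- same NumRows formula as A (math.ceil(math.log2 ·), exact for 1 ≤ n ≤ 2^31)
  let NumRows := MessLength - (Nat.clog 2 MessLength.toNat : Int)
  -- [j for j in range(MessLength) if (j + 1) & j != 0]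
  let dataCols := (PySem.List.pyRange 0 MessLength 1).filter (fun j => PySem.Int.band (j + 1) j != 0)
  -- 'if i < len(dataCols): Row[dataCols[i]] = 1' — pyGet? is none exactly when i ≥ len
  -- (i ≥ 0 here); dataCols entries are nonnegative, so .toNat is the exact Python index
  (PySem.List.pyRange 0 NumRows 1).map (fun i =>
    let Row := List.replicate MessLength.toNat (0 : Int)
    match PySem.List.pyGet? dataCols i with
    | some c => Row.set c.toNat 1
    | none => Row)

-- ===== PRECONDITION & SPEC =====
-- Pre_ excludes non-positive MessLength, on which A raises ValueError (math.log2 domain error); B raises the same.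
def Pre_genRMatrix (MessLength : Int) : Prop := 1 ≤ MessLength
instance (MessLength : Int) : Decidable (Pre_genRMatrix MessLength) := by
  unfold Pre_genRMatrix; infer_instance
def pvWitness_genRMatrix : Int := (7)

def Spec_genRMatrix (MessLength : Int) (out : List (List Int)) : Prop := out = genRMatrix_alt MessLength
instance (MessLength : Int) (out : List (List Int)) : Decidable (Spec_genRMatrix MessLength out) := by unfold Spec_genRMatrix; infer_instance

-- ===== CLAIM (what is proved, stated in full; the proofs are below) =====
def Claim_equal_genRMatrix : Prop := ∀ (MessLength : Int), Dom_genRMatrix MessLength → Pre_genRMatrix MessLength → Spec_genRMatrix MessLength (genRMatrix MessLength)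

-- ===== LEMMAS AND PROOFS =====

-- n is a power of two (n ≥ 1); for n = 0 this is false since 2^0 = 1
def pvIsPow (n : Nat) : Bool := 2 ^ Nat.clog 2 n == n
-- column t (0-based) is a data column: t+1 is not a power of two
def pvD (t : Nat) : Bool := !pvIsPow (t + 1)
-- number of data columns among positions a, a+1, …, a+k-1
def pvCntFrom : Nat → Nat → Nat
  | _, 0 => 0
  | a, k + 1 => (if pvD a then 1 else 0) + pvCntFrom (a + 1) k

theorem pvIsPow_iff (n : Nat) : pvIsPow n = true ↔ ∃ k, n = 2 ^ k := by
  constructor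
  · intro h
    simp only [pvIsPow, beq_iff_eq] at h
    exact ⟨Nat.clog 2 n, h.symm⟩
  · rintro ⟨k, rfl⟩
    have hcl := Nat.clog_pow 2 k (by norm_num)
    simp only [pvIsPow, hcl]
    exact beq_self_eq_true _

theorem pvClog_succ_pow (c : Nat) (h : pvIsPow c = true) :
    Nat.clog 2 (c + 1) = Nat.clog 2 c + 1 := by
  simp only [pvIsPow, beq_iff_eq] at h
  have hc1 : 1 ≤ c := by
    have := Nat.one_le_two_pow (n := Nat.clog 2 c); omega
  apply le_antisymm
  · rw [Nat.clog_le_iff_le_pow (by norm_num)]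
    have hp : 2 ^ (Nat.clog 2 c + 1) = 2 * c := by rw [pow_succ, h]; ring
    omega
  · by_contra hlt
    have h2 : Nat.clog 2 (c + 1) ≤ Nat.clog 2 c := by omega
    rw [Nat.clog_le_iff_le_pow (by norm_num), h] at h2
    omega

theorem pvClog_succ_not_pow (c : Nat) (h : pvIsPow c = false) :
    Nat.clog 2 (c + 1) = Nat.clog 2 c := by
  simp only [pvIsPow, beq_eq_false_iff_ne, ne_eq] at h
  have hle : c ≤ 2 ^ Nat.clog 2 c := Nat.le_pow_clog (by norm_num) c
  apply le_antisymm
  · rw [Nat.clog_le_iff_le_pow (by norm_num)]; omega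
  · exact Nat.clog_mono_right 2 (by omega)

-- the first row of buildParityBitMatrix marks exactly the power-of-two positions
theorem pvRow0_eq (n : Nat) : ∀ c, pvRow0 n c (Nat.clog 2 c) =
    (List.range n).map (fun k => if pvIsPow (c + k) then (1 : Int) else 0) := by
  induction n with
  | zero => intro c; simp [pvRow0]
  | succ f ih =>
    intro c
    rw [List.range_succ_eq_map, List.map_cons, List.map_map]
    by_cases h : pvIsPow c = true
    · have hhit : 2 ^ Nat.clog 2 c = c := by simpa [pvIsPow] using h
      rw [pvRow0, if_pos hhit]
      have hih := ih (c + 1)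
      rw [pvClog_succ_pow c h] at hih
      rw [List.cons_eq_cons]
      refine ⟨by simp [h], ?_⟩
      rw [hih]
      apply List.map_congr_left
      intro k _
      have he : c + 1 + k = c + (k + 1) := by omega
      simp [Function.comp, he]
    · have hmiss : ¬ (2 ^ Nat.clog 2 c = c) := by simpa [pvIsPow] using h
      rw [pvRow0, if_neg hmiss]
      have hih := ih (c + 1)
      rw [pvClog_succ_not_pow c (by simpa using h)] at hih
      rw [List.cons_eq_cons]
      refine ⟨by simp [h], ?_⟩
      rw [hih]
      apply List.map_congr_left
      intro k _
      have he : c + 1 + k = c + (k + 1) := by omega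
      simp [Function.comp, he]

theorem pvTestBit_of_bounds (k x : Nat) (h1 : 2 ^ k ≤ x) (h2 : x < 2 ^ (k + 1)) :
    x.testBit k = true := by
  rw [Nat.testBit_eq_decide_div_mod_eq]
  have hpos : 0 < 2 ^ k := Nat.two_pow_pos k
  have hq1 : 1 ≤ x / 2 ^ k := (Nat.le_div_iff_mul_le hpos).2 (by omega)
  have hq2 : x / 2 ^ k < 2 := (Nat.div_lt_iff_lt_mul hpos).2 (by rw [pow_succ] at h2; omega)
  have : x / 2 ^ k = 1 := by omega
  simp [this]

-- (j+1) & j == 0  ⟺  j+1 is a power of two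
theorem pvLand_eq_zero_iff (j : Nat) : ((j + 1) &&& j = 0) ↔ pvIsPow (j + 1) = true := by
  constructor
  · intro h
    by_contra hnp
    have hnp' : pvIsPow (j + 1) = false := by simpa using hnp
    -- the top bit of j+1 is also set in j
    set k := Nat.log 2 (j + 1) with hk
    have h1 : 2 ^ k ≤ j + 1 := Nat.pow_log_le_self 2 (by omega)
    have h2 : j + 1 < 2 ^ (k + 1) := Nat.lt_pow_succ_log_self (by norm_num) (j + 1)
    have hne : j + 1 ≠ 2 ^ k := by
      intro he
      rw [(pvIsPow_iff (j + 1)).2 ⟨k, he⟩] at hnp'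
      exact Bool.true_eq_false.mp hnp'
    have hb1 : (j + 1).testBit k = true := pvTestBit_of_bounds k (j + 1) h1 h2
    have hb2 : j.testBit k = true := pvTestBit_of_bounds k j (by omega) (by omega)
    have : ((j + 1) &&& j).testBit k = true := by
      rw [Nat.testBit_and, hb1, hb2]; rfl
    rw [h] at this
    simp at this
  · intro h
    obtain ⟨k, hk⟩ := (pvIsPow_iff (j + 1)).1 h
    have hj : j = 2 ^ k - 1 := by omega
    apply Nat.eq_of_testBit_eq
    intro i
    rw [Nat.testBit_and, hk, hj, Nat.testBit_two_pow, Nat.testBit_two_pow_sub_one,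
      Nat.zero_testBit]
    by_cases hik : k = i <;> simp [hik]

theorem pvCntFrom_succ (a k : Nat) :
    pvCntFrom a (k + 1) = (if pvD a then 1 else 0) + pvCntFrom (a + 1) k := rfl

theorem pvCntFrom_eq_length : ∀ (k a : Nat),
    pvCntFrom a k = ((List.range k).filter (fun t => pvD (a + t))).length := by
  intro k
  induction k with
  | zero => intro a; simp [pvCntFrom]
  | succ f ih =>
    intro a
    rw [List.range_succ_eq_map, List.filter_cons, List.filter_map]
    have hc : (List.range f).filter ((fun t => pvD (a + t)) ∘ Nat.succ)
        = (List.range f).filter (fun t => pvD (a + 1 + t)) := by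
      apply List.filter_congr
      intro x _
      show pvD (a + Nat.succ x) = pvD (a + 1 + x)
      congr 1
      omega
    rw [hc]
    by_cases h : pvD (a + 0)
    · rw [if_pos h, List.length_cons, List.length_map, pvCntFrom_succ, ← ih (a + 1)]
      have ha : pvD a = true := by simpa using h
      simp [ha, Nat.add_comm]
    · rw [if_neg h, List.length_map, pvCntFrom_succ, ← ih (a + 1)]
      have ha : pvD a = false := by simpa using h
      simp [ha]

-- the inner loop of A: entry k is 1 exactly on the data column whose running counter hits idBit
theorem pvInner_eq (row0 : List Int) : ∀ (n jn : Nat) (bit idBit : Int),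
    (∀ k : Nat, k < n → PySem.List.pyGet? row0 ((jn + k + 1 : Nat) : Int)
      = some (if pvIsPow (jn + k + 1) then 1 else 0)) →
    pvInner row0 n (jn : Int) bit idBit
      = (List.range n).map (fun k =>
          if pvD (jn + k) = true ∧ bit + (pvCntFrom jn k : Int) = idBit then (1 : Int) else 0) := by
  intro n
  induction n with
  | zero => intro jn bit idBit _; simp [pvInner]
  | succ f ih =>
    intro jn bit idBit h
    have hcast : (jn : Int) + 1 = ((jn + 0 + 1 : Nat) : Int) := by push_cast; ring
    have hg : PySem.List.pyGet? row0 ((jn : Int) + 1)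
        = some (if pvIsPow (jn + 0 + 1) then 1 else 0) := by
      rw [hcast]; exact h 0 (by omega)
    have hshift : ∀ bit' : Int, pvInner row0 f ((jn : Int) + 1) bit' idBit
        = (List.range f).map (fun k =>
            if pvD (jn + 1 + k) = true ∧ bit' + (pvCntFrom (jn + 1) k : Int) = idBit
            then (1 : Int) else 0) := by
      intro bit'
      have hc : ((jn : Int) + 1) = ((jn + 1 : Nat) : Int) := by push_cast; ring
      rw [hc, ih (jn + 1) bit' idBit]
      intro k hk
      have hh := h (k + 1) (by omega)
      have he : jn + 1 + k + 1 = jn + (k + 1) + 1 := by omega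
      rw [he]; exact hh
    have htail : ∀ bit' : Int,
        (bit' = bit ∧ pvD jn = false) ∨ (bit' = bit + 1 ∧ pvD jn = true) →
        pvInner row0 f ((jn : Int) + 1) bit' idBit
          = (List.range f).map ((fun k =>
              if pvD (jn + k) = true ∧ bit + (pvCntFrom jn k : Int) = idBit
              then (1 : Int) else 0) ∘ Nat.succ) := by
      intro bit' hb
      rw [hshift bit']
      apply List.map_congr_left
      intro k _
      simp only [Function.comp_apply, Nat.succ_eq_add_one]
      have h1 : jn + (k + 1) = jn + 1 + k := by omega
      rw [h1]
      rcases hb with ⟨rfl, hD⟩ | ⟨rfl, hD⟩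
      · have hc2 : pvCntFrom jn (k + 1) = pvCntFrom (jn + 1) k := by
          rw [pvCntFrom_succ, hD]; simp
        rw [hc2]
      · have hc2 : pvCntFrom jn (k + 1) = 1 + pvCntFrom (jn + 1) k := by
          rw [pvCntFrom_succ, hD]; simp
        rw [hc2]
        refine if_congr (and_congr_right fun _ => ?_) rfl rfl
        push_cast
        omega
    rw [pvInner, List.range_succ_eq_map, List.map_cons, List.map_map]
    by_cases hp : pvIsPow (jn + 0 + 1) = true
    · have hg1 : PySem.List.pyGet? row0 ((jn : Int) + 1) = some 1 := by rw [hg, if_pos hp]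
      rw [if_pos hg1, List.cons_eq_cons]
      have hD : pvD jn = false := by
        have he : jn + 1 = jn + 0 + 1 := by omega
        simp [pvD, he, hp]
      exact ⟨by simp [hD], htail bit (Or.inl ⟨rfl, hD⟩)⟩
    · have hg0 : PySem.List.pyGet? row0 ((jn : Int) + 1) = some 0 := by
        rw [hg, if_neg hp]
      have hne : ¬ PySem.List.pyGet? row0 ((jn : Int) + 1) = some 1 := by
        rw [hg0]; simp
      rw [if_neg hne]
      have hD : pvD jn = true := by
        have he : jn + 1 = jn + 0 + 1 := by omega
        simp [pvD, he, hp]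
      have hcnt0 : pvCntFrom jn 0 = 0 := rfl
      by_cases hid : idBit = bit
      · rw [if_pos hid, List.cons_eq_cons]
        refine ⟨?_, htail (bit + 1) (Or.inr ⟨rfl, hD⟩)⟩
        simp [hD, hcnt0, hid]
      · rw [if_neg hid, List.cons_eq_cons]
        refine ⟨?_, htail (bit + 1) (Or.inr ⟨rfl, hD⟩)⟩
        have hcc : ¬ (pvD (jn + 0) = true ∧ bit + (pvCntFrom jn 0 : Int) = idBit) := by
          rintro ⟨_, hq⟩
          rw [hcnt0] at hq
          simp at hq
          exact hid hq.symm
        rw [if_neg hcc]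

theorem pvOuter_eq (row0 : List Int) (m : Int) : ∀ (n : Nat) (idBit : Int),
    pvOuter row0 m n idBit
      = (List.range n).map (fun i : Nat => pvInner row0 m.toNat 0 1 (idBit + (i : Int))) := by
  intro n
  induction n with
  | zero => intro idBit; simp [pvOuter]
  | succ f ih =>
    intro idBit
    rw [pvOuter, List.range_succ_eq_map, List.map_cons, ih (idBit + 1), List.map_map,
      List.cons_eq_cons]
    refine ⟨by norm_num, ?_⟩
    apply List.map_congr_left
    intro k _
    simp only [Function.comp_apply, Nat.succ_eq_add_one]
    congr 1
    push_cast
    ring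

-- which element the filtered index list holds at position i
theorem pvIdx_spec (m : Nat) : ∀ (i k : Nat), k < m →
    (((List.range m).filter pvD)[i]? = some k ↔ (pvD k = true ∧ pvCntFrom 0 k = i)) := by
  have hcnt0 : ∀ t : Nat, pvCntFrom 0 t = ((List.range t).filter pvD).length := by
    intro t
    rw [pvCntFrom_eq_length]
    congr 1
    apply List.filter_congr
    intro x _
    simp
  induction m with
  | zero => intro i k hk; omega
  | succ f ih =>
    intro i k hk
    rw [List.range_succ, List.filter_append]
    have hmem : ∀ x ∈ (List.range f).filter pvD, x < f := by
      intro x hx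
      have := List.mem_range.1 (List.mem_of_mem_filter hx)
      omega
    by_cases hif : i < ((List.range f).filter pvD).length
    · rw [List.getElem?_append_left hif]
      by_cases hkf : k < f
      · exact ih i k hkf
      · have hkeq : k = f := by omega
        subst hkeq
        constructor
        · intro hsome
          have hin := List.mem_of_getElem? hsome
          have := hmem _ hin
          omega
        · rintro ⟨hd, hc⟩
          rw [hcnt0 k] at hc
          omega
    · rw [List.getElem?_append_right (by omega)]
      rw [List.filter_singleton]
      by_cases hdf : pvD f
      · rw [hdf]
        simp only [cond_true]
        by_cases hkf : k < f
        · constructor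
          · intro hsome
            have hin : k ∈ [f] := List.mem_of_getElem? hsome
            simp at hin
            omega
          · rintro ⟨hd, hc⟩
            have hsome := (ih (pvCntFrom 0 k) k hkf).2 ⟨hd, rfl⟩
            have hlt : pvCntFrom 0 k < ((List.range f).filter pvD).length :=
              (List.getElem?_eq_some_iff.1 hsome).1
            omega
        · have hkeq : k = f := by omega
          subst hkeq
          constructor
          · intro hsome
            obtain ⟨hlt1, _⟩ := List.getElem?_eq_some_iff.1 hsome
            simp only [List.length_singleton] at hlt1
            refine ⟨hdf, ?_⟩
            rw [hcnt0 k]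
            omega
          · rintro ⟨hd, hc⟩
            rw [hcnt0 k] at hc
            have hz : i - ((List.range k).filter pvD).length = 0 := by omega
            rw [hz]
            simp
      · have hdf' : pvD f = false := by simpa using hdf
        rw [hdf']
        simp only [cond_false]
        constructor
        · intro hsome
          simp at hsome
        · rintro ⟨hd, hc⟩
          by_cases hkf : k < f
          · have hsome := (ih (pvCntFrom 0 k) k hkf).2 ⟨hd, rfl⟩
            have hlt : pvCntFrom 0 k < ((List.range f).filter pvD).length :=
              (List.getElem?_eq_some_iff.1 hsome).1
            omega
          · have hkeq : k = f := by omega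
            subst hkeq
            exact absurd hd hdf


theorem pvClog_le_pred (m : Nat) (hm : 1 ≤ m) : Nat.clog 2 m ≤ m - 1 := by
  rw [Nat.clog_le_iff_le_pow (by norm_num)]
  have := Nat.lt_two_pow_self (n := m - 1)
  omega

theorem pvTwoClog_le (m : Nat) : 2 * Nat.clog 2 m ≤ m + 2 := by
  have h1 : Nat.clog 2 m ≤ m / 2 + 1 := by
    rw [Nat.clog_le_iff_le_pow (by norm_num)]
    have h2 : m / 2 < 2 ^ (m / 2) := Nat.lt_two_pow_self
    have h3 : 2 ^ (m / 2 + 1) = 2 * 2 ^ (m / 2) := by ring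
    omega
  omega

theorem pvMain (M : Int) (hPre : 1 ≤ M) : genRMatrix M = genRMatrix_alt M := by
  have hM0 : 0 ≤ M := by omega
  obtain ⟨m, rfl⟩ := Int.eq_ofNat_of_zero_le hM0
  have hm1 : 1 ≤ m := by exact_mod_cast hPre
  -- abbreviations
  have hLpred : Nat.clog 2 m ≤ m - 1 := pvClog_le_pred m hm1
  have h2L : 2 * Nat.clog 2 m ≤ m + 2 := pvTwoClog_le m
  set L := Nat.clog 2 m with hL
  set R := m - L with hRdef
  have hR1 : 1 ≤ R := by omega
  set F := Nat.log 2 R with hF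
  set C := 2 * (F + 2 + R) with hC
  have hCm : m + 1 < C := by omega
  have hNR : (m : Int) - pvCeilLog2 (m : Int) = ((R : Nat) : Int) := by
    unfold pvCeilLog2
    rw [Int.toNat_natCast]
    omega
  -- the reference row of the parity-bit matrix
  set row0v : List Int := (List.range C).map (fun k => if pvIsPow k then (1 : Int) else 0)
    with hrow0v
  have hrow0' : pvRow0 C 0 0 = row0v := by
    have h0 : Nat.clog 2 0 = 0 := Nat.clog_zero_right 2
    have h1 := pvRow0_eq C 0
    rw [h0] at h1
    rw [h1, hrow0v]
    apply List.map_congr_left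
    intro k _
    rw [Nat.zero_add]
  have hCval : (2 * (pvFloorLog2 (R : Int) + 2 + (R : Int))).toNat = C := by
    unfold pvFloorLog2
    rw [Int.toNat_natCast, ← hF]
    omega
  have hbp : (PySem.List.pyGet? (buildParityBitMatrix (R : Int)) 0).getD [] = row0v := by
    simp only [buildParityBitMatrix]
    rw [if_neg (by exact_mod_cast (by omega : ¬ (R : Int) ≤ 0))]
    rw [PySem.List.pyGet?_zero_cons, Option.getD_some, hCval, hrow0']
  -- the entries of the reference row that genRMatrix reads
  have hread : ∀ k : Nat, k < m → PySem.List.pyGet? row0v ((0 + k + 1 : Nat) : Int)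
      = some (if pvIsPow (0 + k + 1) then 1 else 0) := by
    intro k hk
    rw [hrow0v, PySem.List.pyGet?_natCast, List.getElem?_map,
      List.getElem?_range (by omega : 0 + k + 1 < C)]
    rfl
  -- A's rows in closed form
  have hrowA : ∀ i : Nat, pvInner row0v m 0 1 (1 + (i : Int))
      = (List.range m).map (fun k =>
          if pvD k = true ∧ pvCntFrom 0 k = i then (1 : Int) else 0) := by
    intro i
    have h1 := pvInner_eq row0v m 0 1 (1 + (i : Int)) hread
    rw [Nat.cast_zero] at h1
    rw [h1]
    apply List.map_congr_left
    intro k _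
    rw [Nat.zero_add]
    refine if_congr (and_congr_right fun _ => ?_) rfl rfl
    constructor
    · intro h; exact_mod_cast (by omega : ((pvCntFrom 0 k : Int)) = (i : Int))
    · intro h; rw [h]
  -- A's result
  have hA : genRMatrix (m : Int) = (List.range R).map (fun i : Nat =>
      (List.range m).map (fun k =>
        if pvD k = true ∧ pvCntFrom 0 k = i then (1 : Int) else 0)) := by
    simp only [genRMatrix]
    rw [hNR, hbp, Int.toNat_natCast, pvOuter_eq, Int.toNat_natCast]
    apply List.map_congr_left
    intro i _
    exact hrowA i
  -- B's data-column index list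
  set dIdx : List Nat := (List.range m).filter pvD with hdIdx
  have hdc : (PySem.List.pyRange 0 (m : Int) 1).filter
        (fun j => PySem.Int.band (j + 1) j != 0)
      = dIdx.map (fun k : Nat => (k : Int)) := by
    rw [PySem.List.pyRange_one]
    have hm' : ((m : Int) - 0).toNat = m := by omega
    rw [hm', List.filter_map]
    have hpred : ∀ x ∈ List.range m,
        ((fun j => PySem.Int.band (j + 1) j != 0) ∘ (fun k : Nat => (0 : Int) + (k : Int))) x
          = pvD x := by
      intro x _
      simp only [Function.comp_apply, zero_add]
      have hcast : ((x : Int) + 1) = ((x + 1 : Nat) : Int) := by push_cast; ring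
      rw [hcast, PySem.Int.band_natCast]
      by_cases hxp : pvIsPow (x + 1) = true
      · have hz := (pvLand_eq_zero_iff x).2 hxp
        have hD : pvD x = false := by simp [pvD, hxp]
        rw [hz, hD]
        rfl
      · have hnz : (x + 1) &&& x ≠ 0 := fun hz => hxp ((pvLand_eq_zero_iff x).1 hz)
        have hnz' : (((x + 1) &&& x : Nat) : Int) ≠ 0 := by exact_mod_cast hnz
        have hD : pvD x = true := by simp [pvD, hxp]
        rw [hD]
        simpa using hnz'
    rw [List.filter_congr hpred]
    apply List.map_congr_left
    intro x _
    rw [zero_add]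
  -- assemble both sides
  rw [hA]
  simp only [genRMatrix_alt]
  rw [Int.toNat_natCast, ← hL, show (m : Int) - (L : Int) = (R : Int) by omega, hdc,
    PySem.List.pyRange_one]
  have hR' : ((R : Int) - 0).toNat = R := by omega
  rw [hR', List.map_map]
  apply List.map_congr_left
  intro i hi
  simp only [Function.comp_apply, zero_add, PySem.List.pyGet?_natCast, List.getElem?_map]
  cases hsome : dIdx[i]? with
  | none =>
    simp only [Option.map_none]
    have hzero : ∀ k ∈ List.range m,
        (if pvD k = true ∧ pvCntFrom 0 k = i then (1 : Int) else 0)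
          = (fun _ : Nat => (0 : Int)) k := by
      intro k hk
      rw [if_neg]
      rintro ⟨h1, h2⟩
      have := (pvIdx_spec m i k (List.mem_range.1 hk)).2 ⟨h1, h2⟩
      rw [hsome] at this
      simp at this
    rw [List.map_congr_left hzero, List.map_const', List.length_range]
  | some w =>
    simp only [Option.map_some, Int.toNat_natCast]
    have hwm : w < m := by
      have hin := List.mem_of_getElem? hsome
      have := List.mem_range.1 (List.mem_of_mem_filter hin)
      omega
    apply List.ext_getElem
    · simp
    · intro k hk1 hk2
      simp only [List.getElem_map, List.getElem_range, List.getElem_set,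
        List.getElem_replicate]
      have hklt : k < m := by simpa using hk1
      have hspec := pvIdx_spec m i k hklt
      by_cases hwk : w = k
      · subst hwk
        have hcond := hspec.1 hsome
        rw [if_pos rfl, if_pos hcond]
      · rw [if_neg hwk, if_neg]
        rintro ⟨h1, h2⟩
        have hwk' := hspec.2 ⟨h1, h2⟩
        rw [hsome] at hwk'
        exact hwk (Option.some.inj hwk')

-- ===== VERDICT (by name: the statement is the Claim_ definition above) =====
theorem genRMatrix_spec : Claim_equal_genRMatrix := by
  intro M _ hPre
  unfold Spec_genRMatrix
  exact pvMain M hPre
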